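-- pv_equiv track=rewrite | github.com/PtiCalin/ophthalmology-dataset-harmonization | src/rules.py | infer_severity_from_diagnosis
-- ===== SOURCE A (Python) =====
-- from typing import Optional, Dict, List, Tuple, Set
--
-- SEVERITY_GRADING = {
--     'diabetic retinopathy': {
--         0: 'None',
--         1: 'Mild',
--         2: 'Moderate',
--         3: 'Severe',
--         4: 'Proliferative',
--     },
--     'diabetic macular edema': {
--         0: 'None',
--         1: 'Mild',
--         2: 'Moderate',
--         3: 'Severe',
--     },
--     'amd': {
--         0: 'None',
--         1: 'Early',
--         2: 'Intermediate',
--         3: 'Advanced',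
--     },
--     'cataract': {
--         0: 'None',
--         1: 'Mild',
--         2: 'Moderate',
--         3: 'Mature',
--         4: 'Hypermature',
--     },
--     'glaucoma': {
--         0: 'None',
--         1: 'Mild',
--         2: 'Moderate',
--         3: 'Advanced',
--         4: 'Terminal',
--     },
--     'corneal disease': {
--         0: 'None',
--         1: 'Mild',
--         2: 'Moderate',
--         3: 'Severe',
--     },
--     'retinal detachment': {
--         0: 'None',
--         1: 'Macula-on',
--         2: 'Macula-off',
--         3: 'Rhegmatogenous',
--         4: 'Tractional',
--     },
--     'hypertensive retinopathy': {
--         0: 'None',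
--         1: 'Grade 1',
--         2: 'Grade 2',
--         3: 'Grade 3',
--         4: 'Grade 4',  # Malignant
--     },
-- }
--
-- def infer_severity_from_diagnosis(diagnosis_text: str, diagnosed_condition: str) -> Optional[str]:
--     """
--     Infer severity level based on diagnosis text and condition type.
--
--     Uses both explicit severity keywords in text and implicit severity
--     from condition type (e.g., 'mature cataract' → 'Moderate').
--
--     Implements progressive matching: checks for proliferative/terminal (highest),
--     then severe/advanced, then moderate, then mild/minimal, then none/negative.
--
--     Args:
--         diagnosis_text: Original diagnosis text
--         diagnosed_condition: Standardized diagnosis category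
--
--     Returns:
--         Severity level (e.g., 'Mild', 'Moderate', 'Severe') or None if not determinable
--     """
--     if not diagnosed_condition or diagnosed_condition not in SEVERITY_GRADING:
--         return None
--
--     diagnosis_lower = str(diagnosis_text).lower()
--     condition_grades = SEVERITY_GRADING[diagnosed_condition]
--
--     # Progressive severity keywords (check most specific first)
--     if any(x in diagnosis_lower for x in ['proliferative', 'terminal', 'hypermature', 'advanced']):
--         return condition_grades.get(4, None)
--     elif any(x in diagnosis_lower for x in ['severe', 'advanced', 'significant', 'substantial']):
--         return condition_grades.get(3, None)
--     elif any(x in diagnosis_lower for x in ['moderate', 'intermediate', 'medium']):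
--         return condition_grades.get(2, None)
--     elif any(x in diagnosis_lower for x in ['mild', 'minimal', 'early', 'slight']):
--         return condition_grades.get(1, None)
--     elif any(x in diagnosis_lower for x in ['no ', 'without', 'negative', 'absent', 'none']):
--         return condition_grades.get(0, None)
--
--     return None
-- ===== SOURCE B (Python) =====
-- from typing import Optional
--
-- SEVERITY_GRADING = {
--     'diabetic retinopathy': {0: 'None', 1: 'Mild', 2: 'Moderate', 3: 'Severe', 4: 'Proliferative'},
--     'diabetic macular edema': {0: 'None', 1: 'Mild', 2: 'Moderate', 3: 'Severe'},
--     'amd': {0: 'None', 1: 'Early', 2: 'Intermediate', 3: 'Advanced'},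
--     'cataract': {0: 'None', 1: 'Mild', 2: 'Moderate', 3: 'Mature', 4: 'Hypermature'},
--     'glaucoma': {0: 'None', 1: 'Mild', 2: 'Moderate', 3: 'Advanced', 4: 'Terminal'},
--     'corneal disease': {0: 'None', 1: 'Mild', 2: 'Moderate', 3: 'Severe'},
--     'retinal detachment': {0: 'None', 1: 'Macula-on', 2: 'Macula-off', 3: 'Rhegmatogenous', 4: 'Tractional'},
--     'hypertensive retinopathy': {0: 'None', 1: 'Grade 1', 2: 'Grade 2', 3: 'Grade 3', 4: 'Grade 4'},
-- }
--
-- # Flat keyword -> tier map ('advanced' indicates tier 4, where A's tier-4 branch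
-- # shadows its appearance in the tier-3 list).  Instead of a prioritized
-- # first-match ladder, B accumulates the MAXIMUM matching tier in a single pass.
-- KEYWORD_TIER = {
--     'proliferative': 4, 'terminal': 4, 'hypermature': 4, 'advanced': 4,
--     'severe': 3, 'significant': 3, 'substantial': 3,
--     'moderate': 2, 'intermediate': 2, 'medium': 2,
--     'mild': 1, 'minimal': 1, 'early': 1, 'slight': 1,
--     'no ': 0, 'without': 0, 'negative': 0, 'absent': 0, 'none': 0,
-- }
--
-- def infer_severity_from_diagnosis(diagnosis_text: str, diagnosed_condition: str) -> Optional[str]: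
--     grades = SEVERITY_GRADING.get(diagnosed_condition)
--     if grades is None:
--         return None
--     low = str(diagnosis_text).lower()
--     best = None
--     for kw, tier in KEYWORD_TIER.items():
--         if kw in low:
--             best = tier if best is None else max(best, tier)
--     return None if best is None else grades.get(best)
-- ===== Notes on version B (the rewrite author's own statement) =====
-- stated objective: alternative
-- what changed: Replaces A's five-branch short-circuit if/elif keyword ladder with a single pass over a flat keyword->tier map that accumulates the maximum matching tier, then looks up that tier's grade once; correct because returning the grade of the first matching group in descending tier order equals returning the grade of the maximum matching tier.
import Mathlib
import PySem

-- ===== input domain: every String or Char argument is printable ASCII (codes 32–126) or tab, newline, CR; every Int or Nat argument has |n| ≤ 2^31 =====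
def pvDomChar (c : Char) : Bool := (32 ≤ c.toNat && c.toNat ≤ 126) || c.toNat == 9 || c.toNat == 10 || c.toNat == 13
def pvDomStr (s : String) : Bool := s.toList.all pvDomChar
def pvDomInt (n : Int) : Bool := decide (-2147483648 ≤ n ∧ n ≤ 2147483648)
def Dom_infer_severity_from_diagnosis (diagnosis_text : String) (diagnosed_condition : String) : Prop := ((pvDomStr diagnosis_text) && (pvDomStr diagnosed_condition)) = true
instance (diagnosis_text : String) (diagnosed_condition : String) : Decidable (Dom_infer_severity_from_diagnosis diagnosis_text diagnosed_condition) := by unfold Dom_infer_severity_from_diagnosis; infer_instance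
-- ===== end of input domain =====

-- B replaces A's short-circuit if/elif keyword ladder with a single max-accumulating pass over a flat keyword→tier map (objective: alternative; same cost).

-- Module-level constant SEVERITY_GRADING, shared by both Pythons verbatim.
def pvSEVERITY_GRADING : PySem.Dict String (PySem.Dict Int String) :=
  PySem.Dict.mk
    [ ("diabetic retinopathy", PySem.Dict.mk [(0, "None"), (1, "Mild"), (2, "Moderate"), (3, "Severe"), (4, "Proliferative")])
    , ("diabetic macular edema", PySem.Dict.mk [(0, "None"), (1, "Mild"), (2, "Moderate"), (3, "Severe")])
    , ("amd", PySem.Dict.mk [(0, "None"), (1, "Early"), (2, "Intermediate"), (3, "Advanced")])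
    , ("cataract", PySem.Dict.mk [(0, "None"), (1, "Mild"), (2, "Moderate"), (3, "Mature"), (4, "Hypermature")])
    , ("glaucoma", PySem.Dict.mk [(0, "None"), (1, "Mild"), (2, "Moderate"), (3, "Advanced"), (4, "Terminal")])
    , ("corneal disease", PySem.Dict.mk [(0, "None"), (1, "Mild"), (2, "Moderate"), (3, "Severe")])
    , ("retinal detachment", PySem.Dict.mk [(0, "None"), (1, "Macula-on"), (2, "Macula-off"), (3, "Rhegmatogenous"), (4, "Tractional")])
    , ("hypertensive retinopathy", PySem.Dict.mk [(0, "None"), (1, "Grade 1"), (2, "Grade 2"), (3, "Grade 3"), (4, "Grade 4")])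
    ]

-- ===== PORT A =====
def infer_severity_from_diagnosis (diagnosis_text : String) (diagnosed_condition : String) : Option String :=
  if diagnosed_condition == "" || !(pvSEVERITY_GRADING.contains diagnosed_condition) then none
  else
    let diagnosis_lower := PySem.Str.lower diagnosis_text
    match pvSEVERITY_GRADING.get? diagnosed_condition with
    | none => none  -- unreachable: membership was just checked
    | some condition_grades =>
      if ["proliferative", "terminal", "hypermature", "advanced"].any (fun x => PySem.Str.isIn x diagnosis_lower) then
        condition_grades.get? 4
      else if ["severe", "advanced", "significant", "substantial"].any (fun x => PySem.Str.isIn x diagnosis_lower) then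
        condition_grades.get? 3
      else if ["moderate", "intermediate", "medium"].any (fun x => PySem.Str.isIn x diagnosis_lower) then
        condition_grades.get? 2
      else if ["mild", "minimal", "early", "slight"].any (fun x => PySem.Str.isIn x diagnosis_lower) then
        condition_grades.get? 1
      else if ["no ", "without", "negative", "absent", "none"].any (fun x => PySem.Str.isIn x diagnosis_lower) then
        condition_grades.get? 0
      else
        none

-- ===== PORT B =====
-- B's module-level KEYWORD_TIER dict; keys are distinct, so its .items() is this list in insertion order.
def pvKEYWORD_TIER : List (String × Int) :=
  [ ("proliferative", 4), ("terminal", 4), ("hypermature", 4), ("advanced", 4)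
  , ("severe", 3), ("significant", 3), ("substantial", 3)
  , ("moderate", 2), ("intermediate", 2), ("medium", 2)
  , ("mild", 1), ("minimal", 1), ("early", 1), ("slight", 1)
  , ("no ", 0), ("without", 0), ("negative", 0), ("absent", 0), ("none", 0) ]

-- B's 'for kw, tier in KEYWORD_TIER.items(): …' loop accumulating the max matching tier in 'best'.
def pvBestLoop (low : String) (pairs : List (String × Int)) (best : Option Int) : Option Int :=
  match pairs with
  | [] => best
  | (kw, tier) :: rest =>
    pvBestLoop low rest
      (if PySem.Str.isIn kw low then
        (match best with | none => some tier | some b => some (max b tier))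
      else best)

def infer_severity_from_diagnosis_alt (diagnosis_text : String) (diagnosed_condition : String) : Option String :=
  match pvSEVERITY_GRADING.get? diagnosed_condition with
  | none => none
  | some grades =>
    let low := PySem.Str.lower diagnosis_text
    match pvBestLoop low pvKEYWORD_TIER none with
    | none => none
    | some best => grades.get? best

-- ===== PRECONDITION & SPEC =====
def Spec_infer_severity_from_diagnosis (diagnosis_text : String) (diagnosed_condition : String) (out : Option String) : Prop := out = infer_severity_from_diagnosis_alt diagnosis_text diagnosed_condition
instance (diagnosis_text : String) (diagnosed_condition : String) (out : Option String) : Decidable (Spec_infer_severity_from_diagnosis diagnosis_text diagnosed_condition out) := by unfold Spec_infer_severity_from_diagnosis; infer_instance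

-- ===== CLAIM =====
def Claim_equal_infer_severity_from_diagnosis : Prop := ∀ (diagnosis_text : String) (diagnosed_condition : String), Dom_infer_severity_from_diagnosis diagnosis_text diagnosed_condition → Spec_infer_severity_from_diagnosis diagnosis_text diagnosed_condition (infer_severity_from_diagnosis diagnosis_text diagnosed_condition)

-- ===== LEMMAS AND PROOFS =====

-- Once 'best' holds a tier ≥ every remaining tier, the loop leaves it unchanged.
theorem pvBestLoop_absorb (low : String) (l : List (String × Int)) (a : Int)
    (h : ∀ p ∈ l, p.2 ≤ a) : pvBestLoop low l (some a) = some a := by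
  induction l with
  | nil => rfl
  | cons p rest ih =>
    obtain ⟨k, t⟩ := p
    have ht : t ≤ a := h (k, t) (by simp)
    have hr : ∀ p ∈ rest, p.2 ≤ a := fun p hp => h p (by simp [hp])
    simp only [pvBestLoop]
    split_ifs with hk
    · simpa [max_eq_left ht] using ih hr
    · exact ih hr

-- Running the loop over a block of equal tiers t followed by lower tiers:
-- it returns some t iff some keyword of the block matches, else proceeds on the rest.
theorem pvBestLoop_group (low : String) (g rest : List (String × Int)) (t : Int)
    (hg : ∀ p ∈ g, p.2 = t) (hrest : ∀ p ∈ rest, p.2 ≤ t) :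
    pvBestLoop low (g ++ rest) none =
      if g.any (fun p => PySem.Str.isIn p.1 low) then some t else pvBestLoop low rest none := by
  induction g with
  | nil => simp
  | cons p g' ih =>
    obtain ⟨k, t'⟩ := p
    have ht' : t' = t := hg (k, t') (by simp)
    have hg' : ∀ p ∈ g', p.2 = t := fun p hp => hg p (List.mem_cons_of_mem _ hp)
    simp only [List.cons_append, pvBestLoop, List.any_cons]
    by_cases hk : PySem.Str.isIn k low = true
    · simp only [hk, Bool.true_or, if_pos, ht']
      exact pvBestLoop_absorb low (g' ++ rest) t
        (by intro p hp
            rcases List.mem_append.mp hp with h | h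
            · exact le_of_eq (hg' p h)
            · exact hrest p h)
    · simp only [hk, Bool.false_or, Bool.false_eq_true, if_false]
      exact ih hg'

-- ===== VERDICT =====
theorem infer_severity_from_diagnosis_spec : Claim_equal_infer_severity_from_diagnosis := by
  intro dt dc _
  unfold Spec_infer_severity_from_diagnosis infer_severity_from_diagnosis infer_severity_from_diagnosis_alt
  cases hm : pvSEVERITY_GRADING.get? dc with
  | none =>
    have hc : pvSEVERITY_GRADING.contains dc = false := by
      rw [PySem.Dict.contains_eq_isSome_get?, hm]; rfl
    simp [hc]
  | some g =>
    have hc : pvSEVERITY_GRADING.contains dc = true := by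
      rw [PySem.Dict.contains_eq_isSome_get?, hm]; rfl
    have hd : (dc == "") = false := by
      by_contra h
      have hdc : dc = "" := by simpa using (Bool.not_eq_false _).mp h
      rw [hdc] at hm
      have hnone : pvSEVERITY_GRADING.get? "" = none := by decide
      rw [hnone] at hm; cases hm
    simp only [hd, hc, Bool.not_true, Bool.or_false, Bool.false_eq_true, if_false]
    set low := PySem.Str.lower dt with hlow
    have h4 := pvBestLoop_group low
      [("proliferative", 4), ("terminal", 4), ("hypermature", 4), ("advanced", 4)]
      (pvKEYWORD_TIER.drop 4) 4 (by decide) (by decide)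
    have h3 := pvBestLoop_group low
      [("severe", 3), ("significant", 3), ("substantial", 3)]
      (pvKEYWORD_TIER.drop 7) 3 (by decide) (by decide)
    have h2 := pvBestLoop_group low
      [("moderate", 2), ("intermediate", 2), ("medium", 2)]
      (pvKEYWORD_TIER.drop 10) 2 (by decide) (by decide)
    have h1 := pvBestLoop_group low
      [("mild", 1), ("minimal", 1), ("early", 1), ("slight", 1)]
      (pvKEYWORD_TIER.drop 14) 1 (by decide) (by decide)
    have h0 := pvBestLoop_group low
      [("no ", 0), ("without", 0), ("negative", 0), ("absent", 0), ("none", 0)]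
      ([] : List (String × Int)) 0 (by decide) (by decide)
    have hsplit : pvKEYWORD_TIER =
        [("proliferative", 4), ("terminal", 4), ("hypermature", 4), ("advanced", 4)] ++ pvKEYWORD_TIER.drop 4 := rfl
    rw [hsplit]
    rw [h4]
    by_cases hb4 : ([("proliferative", 4), ("terminal", 4), ("hypermature", 4), ("advanced", 4)] : List (String × Int)).any (fun p => PySem.Str.isIn p.1 low) = true
    · -- a tier-4 keyword matches: both return grades.get(4)
      have ha4 : (["proliferative", "terminal", "hypermature", "advanced"].any fun x => PySem.Str.isIn x low) = true := hb4
      rw [if_pos hb4, if_pos ha4]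
    · have ha4 : ¬ (["proliferative", "terminal", "hypermature", "advanced"].any fun x => PySem.Str.isIn x low) = true := hb4
      have hadv : ¬ PySem.Str.isIn "advanced" low = true := by
        simp only [List.any_cons, List.any_nil, Bool.or_false, Bool.or_eq_true, not_or] at hb4
        exact hb4.2.2.2
      have hsplit3 : pvKEYWORD_TIER.drop 4 =
          [("severe", 3), ("significant", 3), ("substantial", 3)] ++ pvKEYWORD_TIER.drop 7 := rfl
      rw [if_neg hb4, if_neg ha4, hsplit3, h3]
      by_cases hb3 : ([("severe", 3), ("significant", 3), ("substantial", 3)] : List (String × Int)).any (fun p => PySem.Str.isIn p.1 low) = true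
      · -- a tier-3 keyword matches ('advanced' already known not to)
        have ha3 : (["severe", "advanced", "significant", "substantial"].any fun x => PySem.Str.isIn x low) = true := by
          simp only [List.any_cons, List.any_nil, Bool.or_false, Bool.or_eq_true] at hb3 ⊢
          rcases hb3 with h | h | h
          · exact Or.inl h
          · exact Or.inr (Or.inr (Or.inl h))
          · exact Or.inr (Or.inr (Or.inr h))
        rw [if_pos hb3, if_pos ha3]
      · have ha3 : ¬ (["severe", "advanced", "significant", "substantial"].any fun x => PySem.Str.isIn x low) = true := by
          simp only [List.any_cons, List.any_nil, Bool.or_false, Bool.or_eq_true, not_or] at hb3 ⊢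
          exact ⟨hb3.1, hadv, hb3.2.1, hb3.2.2⟩
        have hsplit2 : pvKEYWORD_TIER.drop 7 =
            [("moderate", 2), ("intermediate", 2), ("medium", 2)] ++ pvKEYWORD_TIER.drop 10 := rfl
        rw [if_neg hb3, if_neg ha3, hsplit2, h2]
        by_cases hb2 : ([("moderate", 2), ("intermediate", 2), ("medium", 2)] : List (String × Int)).any (fun p => PySem.Str.isIn p.1 low) = true
        · have ha2 : (["moderate", "intermediate", "medium"].any fun x => PySem.Str.isIn x low) = true := hb2
          rw [if_pos hb2, if_pos ha2]
        · have ha2 : ¬ (["moderate", "intermediate", "medium"].any fun x => PySem.Str.isIn x low) = true := hb2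
          have hsplit1 : pvKEYWORD_TIER.drop 10 =
              [("mild", 1), ("minimal", 1), ("early", 1), ("slight", 1)] ++ pvKEYWORD_TIER.drop 14 := rfl
          rw [if_neg hb2, if_neg ha2, hsplit1, h1]
          by_cases hb1 : ([("mild", 1), ("minimal", 1), ("early", 1), ("slight", 1)] : List (String × Int)).any (fun p => PySem.Str.isIn p.1 low) = true
          · have ha1 : (["mild", "minimal", "early", "slight"].any fun x => PySem.Str.isIn x low) = true := hb1
            rw [if_pos hb1, if_pos ha1]
          · have ha1 : ¬ (["mild", "minimal", "early", "slight"].any fun x => PySem.Str.isIn x low) = true := hb1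
            have hsplit0 : pvKEYWORD_TIER.drop 14 =
                [("no ", 0), ("without", 0), ("negative", 0), ("absent", 0), ("none", 0)] ++ ([] : List (String × Int)) := rfl
            rw [if_neg hb1, if_neg ha1, hsplit0, h0]
            by_cases hb0 : ([("no ", 0), ("without", 0), ("negative", 0), ("absent", 0), ("none", 0)] : List (String × Int)).any (fun p => PySem.Str.isIn p.1 low) = true
            · have ha0 : (["no ", "without", "negative", "absent", "none"].any fun x => PySem.Str.isIn x low) = true := hb0
              rw [if_pos hb0, if_pos ha0]
            · have ha0 : ¬ (["no ", "without", "negative", "absent", "none"].any fun x => PySem.Str.isIn x low) = true := hb0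
              rw [if_neg hb0, if_neg ha0]
              rfl
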